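-- pv_equiv track=rewrite | github.com/KardelRuveyda/uretken-yapayzeka-chatbot-gelistirme-temelleri | homeworks/marmara/CeyhunAY/sifre_kirici.py | bonus_coz
-- ===== SOURCE A (Python) =====
-- def bonus_coz(metin):
--     cozulmus = ""
--     i = 0
--     while i < len(metin):
--         char = metin[i]
--         if char.isalpha():
--             offset = ord('a')
--             yeni_harf = chr((ord(char) - offset - 5) % 26 + offset)
--             cozulmus += yeni_harf
--             i += 1
--         elif char.isdigit():
--             sayi = ""
--             while i < len(metin) and metin[i].isdigit():
--                 sayi += metin[i]
--                 i += 1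
--             cozulmus += sayi[::-1]
--         else:
--             cozulmus += char
--             i += 1
--     return cozulmus
-- ===== SOURCE B (Python) =====
-- def bonus_coz(metin):
--     n = len(metin)
--     digit = [c.isdigit() for c in metin]
--     start = [0] * n
--     for i in range(n):
--         start[i] = start[i - 1] if i > 0 and digit[i] and digit[i - 1] else i
--     end = [0] * n
--     for i in range(n - 1, -1, -1):
--         end[i] = end[i + 1] if i < n - 1 and digit[i] and digit[i + 1] else i
--     out = []
--     for i, (c, d, s, e) in enumerate(zip(metin, digit, start, end)):
--         if d:
--             out.append(metin[s + e - i])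
--         elif c.isalpha():
--             out.append(chr((ord(c) - ord('a') - 5) % 26 + ord('a')))
--         else:
--             out.append(c)
--     return ''.join(out)
-- ===== Notes on version B (the rewrite author's own statement) =====
-- stated objective: faster
-- what changed: B is a staged, position-wise algorithm: it precomputes per-index digit-run boundary arrays start[] and end[] in a forward and a backward pass, then emits each output character directly as metin[start[i]+end[i]-i] for digits (an index permutation) or the shifted letter, collected in a list and joined once, instead of A's sequential scan that accumulates reversed digit runs by repeated string concatenation.
import Mathlib
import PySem

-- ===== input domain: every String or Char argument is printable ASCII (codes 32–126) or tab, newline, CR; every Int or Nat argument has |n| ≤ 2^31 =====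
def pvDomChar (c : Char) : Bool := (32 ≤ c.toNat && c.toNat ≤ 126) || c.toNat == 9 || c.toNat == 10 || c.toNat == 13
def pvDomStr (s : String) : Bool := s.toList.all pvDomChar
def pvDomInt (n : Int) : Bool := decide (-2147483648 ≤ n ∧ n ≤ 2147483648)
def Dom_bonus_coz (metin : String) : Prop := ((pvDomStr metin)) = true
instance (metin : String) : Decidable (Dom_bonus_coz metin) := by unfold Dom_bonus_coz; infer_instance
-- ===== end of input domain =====

-- B replaces A's sequential accumulate-reversed-runs scan by staged passes: boundary
-- arrays start[]/end[] plus a position-wise index-permutation output built as a list and joined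
-- once (A accumulates by repeated string concatenation); objective: faster (measured).

-- ===== PORT A =====
-- chr((ord(char) - ord('a') - 5) % 26 + ord('a')) — Python's % on positive divisor = Int.emod
def pvShift (c : Char) : Char :=
  Char.ofNat ((((c.toNat : Int) - 97 - 5) % 26 + 97).toNat)

-- the while loop over index i, transcribed as recursion on the remaining suffix;
-- the inner digit-collecting while is the takeWhile/dropWhile of PySem.Chars.isdigit
def bonusCozGoA : List Char → List Char
  | [] => []
  | c :: rest =>
    if PySem.Chars.isalpha c then
      pvShift c :: bonusCozGoA rest
    else if PySem.Chars.isdigit c then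
      (List.takeWhile PySem.Chars.isdigit (c :: rest)).reverse ++
        bonusCozGoA (List.dropWhile PySem.Chars.isdigit (c :: rest))
    else
      c :: bonusCozGoA rest
  termination_by l => l.length
  decreasing_by
    · simp
    · simp_all [List.dropWhile]
      exact List.length_dropWhile_le _ _
    · simp

def bonus_coz (metin : String) : String := String.ofList (bonusCozGoA metin.toList)

-- ===== PORT B =====
-- forward pass: start[i] = start[i-1] if i>0 and digit[i] and digit[i-1] else i,
-- carried as (index, previous digit flag, previous start value)
def startGo : List Bool → Nat → Bool → Nat → List Nat
  | [], _, _, _ => []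
  | d :: rest, i, pd, ps =>
    let s := if d && pd then ps else i
    s :: startGo rest (i + 1) d s

-- backward pass: end[i] = end[i+1] if i<n-1 and digit[i] and digit[i+1] else i,
-- expressed as structural recursion computing the suffix first (rest.headD false = digit[i+1])
def endGo : List Bool → Nat → List Nat
  | [], _ => []
  | d :: rest, i =>
    let e := endGo rest (i + 1)
    (if d && rest.headD false then e.headD i else i) :: e

-- output loop: for i, (c, d, s, e) in enumerate(zip(metin, digit, start, end));
-- metin[s+e-i] is always in range (start[i] ≤ i ≤ end[i]), so getD's default is never used
def outGo (full : List Char) : Nat → List Char → List Bool → List Nat → List Nat → List Char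
  | i, c :: cs, d :: ds, s :: ss, e :: es =>
    (if d then full.getD (s + e - i) c
     else if PySem.Chars.isalpha c then pvShift c else c) :: outGo full (i + 1) cs ds ss es
  | _, _, _, _, _ => []

def bonus_coz_alt (metin : String) : String :=
  let cs := metin.toList
  let ds := cs.map PySem.Chars.isdigit
  String.ofList (outGo cs 0 cs ds (startGo ds 0 false 0) (endGo ds 0))

-- ===== PRECONDITION & SPEC =====
def Spec_bonus_coz (metin : String) (out : String) : Prop := out = bonus_coz_alt metin
instance (metin : String) (out : String) : Decidable (Spec_bonus_coz metin out) := by unfold Spec_bonus_coz; infer_instance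

-- ===== CLAIM (what is proved, stated in full; the proofs are below) =====
def Claim_equal_bonus_coz : Prop := ∀ (metin : String), Dom_bonus_coz metin → Spec_bonus_coz metin (bonus_coz metin)

-- ===== LEMMAS AND PROOFS =====

def pvDecode (c : Char) : Char := if PySem.Chars.isalpha c then pvShift c else c

-- proof-side common form: maximal runs of equal isdigit-key
def bonusCozGroups : List Char → List (Bool × List Char)
  | [] => []
  | c :: rest =>
    let k := PySem.Chars.isdigit c
    (k, c :: List.takeWhile (fun x => PySem.Chars.isdigit x == k) rest) ::
      bonusCozGroups (List.dropWhile (fun x => PySem.Chars.isdigit x == k) rest)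
  termination_by l => l.length
  decreasing_by
    exact Nat.lt_succ_of_le (List.length_dropWhile_le _ _)

def pvGroupsOut (l : List Char) : List Char :=
  (bonusCozGroups l).flatMap (fun g => if g.1 then g.2.reverse else g.2.map pvDecode)

-- a run of non-digit chars is consumed by A one char at a time
theorem goA_nondigit_run (g t : List Char) (h : ∀ c ∈ g, PySem.Chars.isdigit c = false) :
    bonusCozGoA (g ++ t) = g.map pvDecode ++ bonusCozGoA t := by
  induction g with
  | nil => simp
  | cons c g ih =>
    have hc : PySem.Chars.isdigit c = false := h c (by simp)
    have hg : ∀ x ∈ g, PySem.Chars.isdigit x = false := fun x hx => h x (by simp [hx])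
    by_cases ha : PySem.Chars.isalpha c
    · simp [bonusCozGoA, ha, pvDecode, ih hg]
    · simp [bonusCozGoA, ha, hc, pvDecode, ih hg]

theorem pv_not_alpha_of_digit (c : Char) (h : PySem.Chars.isdigit c = true) :
    PySem.Chars.isalpha c = false := by
  simp [PySem.Chars.isalpha, PySem.Chars.isdigit, PySem.Chars.isupper, PySem.Chars.islower,
    Char.le_def, UInt32.le_iff_toNat_le] at h ⊢
  omega

theorem goA_eq_groups (l : List Char) : bonusCozGoA l = pvGroupsOut l := by
  induction hn : l.length using Nat.strong_induction_on generalizing l with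
  | _ n ih =>
  match l with
  | [] => simp [bonusCozGoA, bonusCozGroups, pvGroupsOut]
  | c :: rest =>
    by_cases hd : PySem.Chars.isdigit c
    · have ha : PySem.Chars.isalpha c = false := pv_not_alpha_of_digit c hd
      have hlen : (List.dropWhile PySem.Chars.isdigit rest).length < n := by
        subst hn; exact Nat.lt_succ_of_le (List.length_dropWhile_le _ _)
      have hrec := ih _ hlen _ rfl
      rw [bonusCozGoA]
      unfold pvGroupsOut bonusCozGroups
      simp [ha, hd, List.dropWhile_cons_of_pos, List.takeWhile_cons_of_pos, hrec, pvGroupsOut]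
    · have hk : PySem.Chars.isdigit c = false := by simpa using hd
      have hlen : (List.dropWhile (fun x => !PySem.Chars.isdigit x) rest).length < n := by
        subst hn; exact Nat.lt_succ_of_le (List.length_dropWhile_le _ _)
      have hrec := ih _ hlen _ rfl
      have hall : ∀ x ∈ c :: List.takeWhile (fun x => !PySem.Chars.isdigit x) rest,
          PySem.Chars.isdigit x = false := by
        intro x hx
        rcases List.mem_cons.mp hx with h | h
        · subst h; exact hk
        · simpa using List.mem_takeWhile_imp h
      have key : (c :: rest) = (c :: List.takeWhile (fun x => !PySem.Chars.isdigit x) rest)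
          ++ List.dropWhile (fun x => !PySem.Chars.isdigit x) rest := by
        rw [List.cons_append, List.takeWhile_append_dropWhile]
      rw [key, goA_nondigit_run _ _ hall]
      unfold pvGroupsOut bonusCozGroups
      simp [hk, hrec, pvGroupsOut]

-- ===== B-side lemmas =====

-- startGo with previous-digit flag false ignores the previous start value
theorem startGo_ps_irrel (l : List Bool) (i ps ps' : Nat) :
    startGo l i false ps = startGo l i false ps' := by
  cases l with
  | nil => rfl
  | cons d rest => simp [startGo]

-- when the list is empty or starts with a non-digit, the carried state is irrelevant
theorem startGo_head_false (l : List Bool) (i ps : Nat) (pd : Bool)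
    (h : l = [] ∨ l.headD false = false) :
    startGo l i pd ps = startGo l i false 0 := by
  cases l with
  | nil => rfl
  | cons d rest =>
    rcases h with h | h
    · cases h
    · simp at h; subst h; simp [startGo]

theorem startGo_false_run (m : Nat) (r : List Bool) (i ps : Nat) :
    startGo (List.replicate m false ++ r) i false ps
      = List.range' i m ++ startGo r (i + m) false 0 := by
  induction m generalizing i ps with
  | zero => simpa using startGo_ps_irrel r i ps 0
  | succ m ihm =>
    have h1 : i + 1 + m = i + (m + 1) := by omega
    simp [List.replicate_succ, startGo, List.range'_succ, ihm (i + 1) i, h1]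

theorem startGo_true_run (m : Nat) (r : List Bool) (i ps : Nat)
    (hr : r = [] ∨ r.headD false = false) :
    startGo (List.replicate (m + 1) true ++ r) i false ps
      = List.replicate (m + 1) i ++ startGo r (i + m + 1) false 0 := by
  have aux : ∀ m' j, startGo (List.replicate m' true ++ r) j true i
      = List.replicate m' i ++ startGo r (j + m') false 0 := by
    intro m'
    induction m' with
    | zero => intro j; simpa using startGo_head_false r j i true hr
    | succ m' ihm =>
      intro j
      have h1 : j + 1 + m' = j + (m' + 1) := by omega
      simp [List.replicate_succ, startGo, ihm (j + 1), h1]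
  have h2 : i + 1 + m = i + m + 1 := by omega
  simp [List.replicate_succ, startGo, aux m (i + 1), h2]

theorem endGo_false_run (m : Nat) (r : List Bool) (i : Nat) :
    endGo (List.replicate m false ++ r) i = List.range' i m ++ endGo r (i + m) := by
  induction m generalizing i with
  | zero => simp
  | succ m ihm =>
    have h1 : i + 1 + m = i + (m + 1) := by omega
    simp [List.replicate_succ, endGo, List.range'_succ, ihm (i + 1), h1]

theorem endGo_true_run (m : Nat) (r : List Bool) (i : Nat)
    (hr : r = [] ∨ r.headD false = false) :
    endGo (List.replicate (m + 1) true ++ r) i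
      = List.replicate (m + 1) (i + m) ++ endGo r (i + m + 1) := by
  induction m generalizing i with
  | zero =>
    rcases hr with hr | hr
    · subst hr; simp [endGo]
    · cases r with
      | nil => simp [endGo]
      | cons d rest => simp at hr; subst hr; simp [endGo]
  | succ m ihm =>
    have h1 : i + 1 + m = i + (m + 1) := by omega
    rw [List.replicate_succ, List.cons_append, endGo, ihm (i + 1)]
    simp [List.replicate_succ, h1]

-- outGo splits over equal-length segments
theorem outGo_append (full : List Char) (g t : List Char) (d1 d2 : List Bool)
    (s1 s2 e1 e2 : List Nat) (i : Nat)
    (hd : d1.length = g.length) (hs : s1.length = g.length) (he : e1.length = g.length) :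
    outGo full i (g ++ t) (d1 ++ d2) (s1 ++ s2) (e1 ++ e2)
      = outGo full i g d1 s1 e1 ++ outGo full (i + g.length) t d2 s2 e2 := by
  induction g generalizing i d1 s1 e1 with
  | nil =>
    have hd' : d1 = [] := List.eq_nil_of_length_eq_zero (by simpa using hd)
    have hs' : s1 = [] := List.eq_nil_of_length_eq_zero (by simpa using hs)
    have he' : e1 = [] := List.eq_nil_of_length_eq_zero (by simpa using he)
    subst hd'; subst hs'; subst he'; simp [outGo]
  | cons c g ihg =>
    cases d1 with
    | nil => simp at hd
    | cons d d1 =>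
      cases s1 with
      | nil => simp at hs
      | cons s s1 =>
        cases e1 with
        | nil => simp at he
        | cons e e1 =>
          simp only [List.cons_append, outGo]
          rw [ihg _ _ _ _ (by simpa using hd) (by simpa using hs) (by simpa using he)]
          have h1 : i + 1 + g.length = i + (g.length + 1) := by omega
          simp [h1]

-- a digit run emits full[s+e-i] at each position
theorem outGo_digit_zip (full : List Char) (g : List Char) (s e : Nat) :
    ∀ i, outGo full i g (List.replicate g.length true)
        (List.replicate g.length s) (List.replicate g.length e)
      = (g.zipIdx i).map (fun ce => full.getD (s + e - ce.2) ce.1) := by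
  induction g with
  | nil => intro i; simp [outGo]
  | cons c g ihg =>
    intro i
    simp only [List.length_cons, List.replicate_succ, outGo, List.zipIdx_cons, List.map_cons]
    rw [ihg (i + 1)]
    simp

theorem outGo_digit_run (p g t : List Char) (m : Nat) (hm : g.length = m + 1) :
    outGo (p ++ g ++ t) p.length g (List.replicate (m + 1) true)
        (List.replicate (m + 1) p.length) (List.replicate (m + 1) (p.length + m))
      = g.reverse := by
  rw [← hm, outGo_digit_zip]
  apply List.ext_getElem
  · simp
  · intro k hk hk'
    simp only [List.getElem_map, List.getElem_zipIdx, List.getElem_reverse]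
    have hkg : k < g.length := by simpa using hk'
    have hidx : p.length + (p.length + m) - (p.length + k) = p.length + (m - k) := by omega
    rw [hidx]
    have hrange : p.length + (m - k) < (p ++ g ++ t).length := by
      simp [List.length_append]; omega
    rw [List.getD_eq_getElem _ _ hrange]
    have h1 : p.length + (m - k) < (p ++ g).length := by simp; omega
    rw [List.getElem_append_left h1, List.getElem_append_right (by omega)]
    congr 1
    omega

-- a non-digit run decodes characterwise, ignoring the boundary arrays
theorem outGo_nondigit_run (full : List Char) (g : List Char)
    (h : ∀ c ∈ g, PySem.Chars.isdigit c = false) :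
    ∀ (i : Nat) (ss es : List Nat), ss.length = g.length → es.length = g.length →
      outGo full i g (g.map PySem.Chars.isdigit) ss es = g.map pvDecode := by
  induction g with
  | nil => intro i ss es _ _; simp [outGo]
  | cons c g ihg =>
    intro i ss es hs he
    cases ss with
    | nil => simp at hs
    | cons s ss =>
      cases es with
      | nil => simp at he
      | cons e es =>
        have hc := h c (by simp)
        simp only [List.map_cons, outGo, hc]
        rw [ihg (fun x hx => h x (by simp [hx])) (i + 1) ss es
          (by simpa using hs) (by simpa using he)]
        simp [pvDecode]

theorem map_digit_true (g : List Char) (h : ∀ c ∈ g, PySem.Chars.isdigit c = true) :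
    g.map PySem.Chars.isdigit = List.replicate g.length true := by
  induction g with
  | nil => simp
  | cons c g ihg =>
    simp [List.replicate_succ, h c (by simp), ihg (fun x hx => h x (by simp [hx]))]

theorem map_digit_false (g : List Char) (h : ∀ c ∈ g, PySem.Chars.isdigit c = false) :
    g.map PySem.Chars.isdigit = List.replicate g.length false := by
  induction g with
  | nil => simp
  | cons c g ihg =>
    simp [List.replicate_succ, h c (by simp), ihg (fun x hx => h x (by simp [hx]))]

theorem map_headD_false (l : List Char) (h : l = [] ∨ PySem.Chars.isdigit (l.headD '0') = false) :
    l.map PySem.Chars.isdigit = [] ∨ (l.map PySem.Chars.isdigit).headD false = false := by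
  cases l with
  | nil => left; rfl
  | cons c rest =>
    right
    rcases h with h | h
    · cases h
    · simpa using h

theorem dropWhile_head_not (p : Char → Bool) (l : List Char) :
    List.dropWhile p l = [] ∨ p ((List.dropWhile p l).headD '0') = false := by
  induction l with
  | nil => left; rfl
  | cons c rest ih =>
    by_cases h : p c
    · simpa [List.dropWhile_cons_of_pos h] using ih
    · right
      rw [List.dropWhile_cons_of_neg (by simpa using h)]
      simpa using h

theorem pvGroupsOut_cons (c : Char) (rest : List Char) :
    pvGroupsOut (c :: rest) =
      (if PySem.Chars.isdigit c then
          (c :: List.takeWhile (fun x => PySem.Chars.isdigit x == PySem.Chars.isdigit c) rest).reverse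
        else (c :: List.takeWhile (fun x => PySem.Chars.isdigit x == PySem.Chars.isdigit c) rest).map pvDecode)
      ++ pvGroupsOut (List.dropWhile (fun x => PySem.Chars.isdigit x == PySem.Chars.isdigit c) rest) := by
  conv_lhs => rw [pvGroupsOut, bonusCozGroups]
  rw [List.flatMap_cons, ← pvGroupsOut]

-- main invariant: on the suffix u of full = p ++ u, B's three arrays produce the group output
theorem outGo_eq_groups (n : Nat) : ∀ (u p : List Char), u.length = n →
    outGo (p ++ u) p.length u (u.map PySem.Chars.isdigit)
        (startGo (u.map PySem.Chars.isdigit) p.length false 0)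
        (endGo (u.map PySem.Chars.isdigit) p.length)
      = pvGroupsOut u := by
  induction n using Nat.strong_induction_on with
  | _ n ih =>
  intro u p hn
  match u with
  | [] => simp [outGo, pvGroupsOut, bonusCozGroups]
  | c :: rest =>
    by_cases hd : PySem.Chars.isdigit c
    · -- digit run
      set g := List.takeWhile PySem.Chars.isdigit (c :: rest) with hg
      set t := List.dropWhile PySem.Chars.isdigit (c :: rest) with htdef
      have hsplit : c :: rest = g ++ t := (List.takeWhile_append_dropWhile).symm
      have hgall : ∀ x ∈ g, PySem.Chars.isdigit x = true := fun x hx => List.mem_takeWhile_imp hx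
      have hgc : g = c :: List.takeWhile PySem.Chars.isdigit rest := by
        simp [hg, List.takeWhile_cons_of_pos hd]
      have hm : g.length = (List.takeWhile PySem.Chars.isdigit rest).length + 1 := by
        simp [hgc]
      set m := (List.takeWhile PySem.Chars.isdigit rest).length with hmdef
      have hthead := dropWhile_head_not PySem.Chars.isdigit (c :: rest)
      have hth : t.map PySem.Chars.isdigit = [] ∨
          (t.map PySem.Chars.isdigit).headD false = false :=
        map_headD_false t (by rw [htdef]; exact hthead)
      have hdsg : g.map PySem.Chars.isdigit = List.replicate (m + 1) true := by
        rw [map_digit_true g hgall, hm]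
      have hds : (c :: rest).map PySem.Chars.isdigit
          = List.replicate (m + 1) true ++ t.map PySem.Chars.isdigit := by
        rw [hsplit, List.map_append, hdsg]
      have htlen : t.length < n := by
        rw [← hn, hsplit, List.length_append, hm]; omega
      have hrec := ih t.length htlen t (p ++ g) rfl
      -- groups-side decomposition
      have e3 : t = List.dropWhile PySem.Chars.isdigit rest := by
        rw [htdef, List.dropWhile_cons_of_pos hd]
      have hG : pvGroupsOut (c :: rest) = g.reverse ++ pvGroupsOut t := by
        rw [pvGroupsOut_cons, hd]
        have e1 : c :: List.takeWhile (fun x => PySem.Chars.isdigit x == true) rest = g := by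
          rw [hgc]; simp
        have e2 : List.dropWhile (fun x => PySem.Chars.isdigit x == true) rest = t := by
          rw [e3]; simp
        rw [e1, e2, if_pos rfl]
      rw [hG, hds, startGo_true_run _ _ _ _ hth, endGo_true_run _ _ _ hth]
      conv_lhs => rw [hsplit]
      rw [outGo_append _ _ _ _ _ _ _ _ _ _ (by simp [hm]) (by simp [hm]) (by simp [hm])]
      have hdig : outGo (p ++ (g ++ t)) p.length g (List.replicate (m + 1) true)
          (List.replicate (m + 1) p.length) (List.replicate (m + 1) (p.length + m))
            = g.reverse := by
        have := outGo_digit_run p g t m hm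
        simpa using this
      rw [hdig]
      have hrest : outGo (p ++ (g ++ t)) (p.length + g.length) t (t.map PySem.Chars.isdigit)
          (startGo (t.map PySem.Chars.isdigit) (p.length + m + 1) false 0)
          (endGo (t.map PySem.Chars.isdigit) (p.length + m + 1))
            = pvGroupsOut t := by
        have h1 : p.length + g.length = (p ++ g).length := by simp
        have h2 : p.length + m + 1 = (p ++ g).length := by simp [hm]; omega
        have hfull : p ++ (g ++ t) = (p ++ g) ++ t := by simp
        rw [h1, h2, hfull]
        exact hrec
      rw [hrest]
    · -- non-digit run
      have hk : PySem.Chars.isdigit c = false := by simpa using hd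
      set g := List.takeWhile (fun x => !PySem.Chars.isdigit x) (c :: rest) with hg
      set t := List.dropWhile (fun x => !PySem.Chars.isdigit x) (c :: rest) with htdef
      have hsplit : c :: rest = g ++ t := (List.takeWhile_append_dropWhile).symm
      have hgall : ∀ x ∈ g, PySem.Chars.isdigit x = false := by
        intro x hx; have := List.mem_takeWhile_imp hx; simpa using this
      have hpc : (fun x => !PySem.Chars.isdigit x) c = true := by simp [hk]
      have hgc : g = c :: List.takeWhile (fun x => !PySem.Chars.isdigit x) rest := by
        rw [hg, List.takeWhile_cons_of_pos (p := fun x => !PySem.Chars.isdigit x) hpc]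
      have hdsg : g.map PySem.Chars.isdigit = List.replicate g.length false :=
        map_digit_false g hgall
      have hds : (c :: rest).map PySem.Chars.isdigit
          = List.replicate g.length false ++ t.map PySem.Chars.isdigit := by
        rw [hsplit, List.map_append, hdsg]
      have hg0 : 0 < g.length := by simp [hgc]
      have htlen : t.length < n := by
        rw [← hn, hsplit, List.length_append]; omega
      have hrec := ih t.length htlen t (p ++ g) rfl
      have e3 : t = List.dropWhile (fun x => !PySem.Chars.isdigit x) rest := by
        rw [htdef, List.dropWhile_cons_of_pos (p := fun x => !PySem.Chars.isdigit x) hpc]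
      have hG : pvGroupsOut (c :: rest) = g.map pvDecode ++ pvGroupsOut t := by
        rw [pvGroupsOut_cons, hk]
        have e1 : c :: List.takeWhile (fun x => PySem.Chars.isdigit x == false) rest = g := by
          rw [hgc]; simp
        have e2 : List.dropWhile (fun x => PySem.Chars.isdigit x == false) rest = t := by
          rw [e3]; simp
        rw [e1, e2, if_neg (by simp)]
      rw [hG, hds, startGo_false_run, endGo_false_run]
      conv_lhs => rw [hsplit]
      rw [outGo_append _ _ _ _ _ _ _ _ _ _ (by simp) (by simp) (by simp)]
      rw [← hdsg, outGo_nondigit_run _ g hgall p.length _ _ (by simp) (by simp)]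
      have hrest : outGo (p ++ (g ++ t)) (p.length + g.length) t (t.map PySem.Chars.isdigit)
          (startGo (t.map PySem.Chars.isdigit) (p.length + g.length) false 0)
          (endGo (t.map PySem.Chars.isdigit) (p.length + g.length))
            = pvGroupsOut t := by
        have h1 : p.length + g.length = (p ++ g).length := by simp
        have hfull : p ++ (g ++ t) = (p ++ g) ++ t := by simp
        rw [h1, hfull]
        exact hrec
      rw [hrest]

-- ===== VERDICT (by name: the statement is the Claim_ definition above) =====
theorem bonus_coz_spec : Claim_equal_bonus_coz := by
  intro metin _
  unfold Spec_bonus_coz bonus_coz bonus_coz_alt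
  rw [goA_eq_groups]
  have h := outGo_eq_groups metin.toList.length metin.toList [] rfl
  simp only [List.nil_append, List.length_nil] at h
  exact (congrArg String.ofList h).symm
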